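-- pv_equiv track=rewrite | github.com/damoahdominic/clawdj | backend/main.py | _order_by_bpm
-- ===== SOURCE A (Python) =====
-- def _order_by_bpm(tracks: list, bpm_range: int = 15) -> list:
--     """Order tracks by BPM for smooth energy flow.
--     Groups tracks into BPM clusters and picks the largest cluster.
--     Within the cluster, sorts by BPM for gradual progression.
--     """
--     if len(tracks) <= 2:
--         return tracks
--
--     # Find the most common BPM range
--     bpms = [t.get("_bpm", 0) for t in tracks if t.get("_bpm", 0) > 0]
--     if not bpms:
--         return tracks
--
--     # Find the BPM center that captures the most tracks
--     best_center = bpms[0]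
--     best_count = 0
--     for center in bpms:
--         count = sum(1 for b in bpms if abs(b - center) <= bpm_range)
--         if count > best_count:
--             best_count = count
--             best_center = center
--
--     # Filter to tracks within range of best center, keep others as fallback
--     in_range = [t for t in tracks if t.get("_bpm", 0) > 0 and abs(t["_bpm"] - best_center) <= bpm_range]
--     out_range = [t for t in tracks if t not in in_range]
--
--     # Sort in-range by BPM for smooth progression
--     in_range.sort(key=lambda t: t.get("_bpm", 0))
--
--     return in_range + out_range
-- ===== SOURCE B (Python) =====
-- def _bisect_left(a, x):
--     lo, hi = 0, len(a)
--     while lo < hi: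
--         mid = (lo + hi) // 2
--         if a[mid] < x:
--             lo = mid + 1
--         else:
--             hi = mid
--     return lo
--
--
-- def _bisect_right(a, x):
--     lo, hi = 0, len(a)
--     while lo < hi:
--         mid = (lo + hi) // 2
--         if x < a[mid]:
--             hi = mid
--         else:
--             lo = mid + 1
--     return lo
--
--
-- def _order_by_bpm(tracks: list, bpm_range: int = 15) -> list:
--     if len(tracks) <= 2:
--         return tracks
--
--     bpms = [t.get("_bpm", 0) for t in tracks if t.get("_bpm", 0) > 0]
--     if not bpms:
--         return tracks
--
--     # Sort the BPMs once; each candidate window is counted by binary search.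
--     s = sorted(bpms)
--
--     def window(c):
--         return _bisect_right(s, c + bpm_range) - _bisect_left(s, c - bpm_range)
--
--     # Python's max returns the FIRST maximal element, matching A's first-strict-max scan.
--     best_center = max(bpms, key=window)
--
--     def key(t):
--         b = t.get("_bpm", 0)
--         if b > 0 and abs(b - best_center) <= bpm_range:
--             return (0, b)
--         return (1, 0)
--
--     # ONE stable sort replaces partition + in-place sort + concatenation:
--     # in-range tracks come first ordered by BPM, the rest keep their original order.
--     return sorted(tracks, key=key)
-- ===== Notes on version B (the rewrite author's own statement) =====
-- stated objective: alternative
-- what changed: The nested best-center rescan is replaced by sorting the BPMs once and counting each window by binary search with max(key=...), and the partition + in-place sort + concatenation is replaced by one stable sort of all tracks under a two-component key.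
import Mathlib
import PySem

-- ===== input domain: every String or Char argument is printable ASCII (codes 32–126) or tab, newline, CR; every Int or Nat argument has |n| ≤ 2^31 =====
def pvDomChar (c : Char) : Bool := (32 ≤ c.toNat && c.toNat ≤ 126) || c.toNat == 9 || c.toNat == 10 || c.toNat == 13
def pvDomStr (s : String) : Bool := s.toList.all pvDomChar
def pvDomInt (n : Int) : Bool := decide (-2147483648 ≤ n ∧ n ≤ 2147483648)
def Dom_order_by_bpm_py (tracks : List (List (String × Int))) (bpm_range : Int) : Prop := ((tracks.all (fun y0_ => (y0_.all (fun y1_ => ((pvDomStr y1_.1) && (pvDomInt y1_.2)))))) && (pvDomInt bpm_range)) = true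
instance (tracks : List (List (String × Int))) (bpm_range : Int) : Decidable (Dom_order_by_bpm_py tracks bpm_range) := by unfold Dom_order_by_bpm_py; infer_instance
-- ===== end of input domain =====

-- B replaces A's nested best-center rescans by sorted BPMs + binary-search window counts under
-- max(key=...), and A's partition/in-place-sort/concatenation by ONE stable two-key sort
-- (objective: alternative). A sorts its in_range list in place; the equivalence proved here is
-- about the return value only.

-- ===== PORT A =====
-- t.get("_bpm", 0)   (also covers t["_bpm"], which A only reads under a t.get("_bpm",0) > 0 guard)
def pvGetBpm (t : List (String × Int)) : Int := PySem.Dict.getD (PySem.Dict.mk t) "_bpm" 0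

def order_by_bpm_py (tracks : List (List (String × Int))) (bpm_range : Int) : List (List (String × Int)) :=
  if (tracks.length : Int) ≤ 2 then tracks else
  let bpms := (tracks.filter (fun t => decide (0 < pvGetBpm t))).map pvGetBpm
  if bpms = [] then tracks else
  -- for center in bpms: count = sum(1 for b in bpms if abs(b - center) <= bpm_range); track first strict max
  let best := bpms.foldl (fun st center =>
      let count := bpms.foldl (fun acc b => if |b - center| ≤ bpm_range then acc + 1 else acc) (0 : Int)
      if st.2 < count then (center, count) else st) (PySem.List.pyGetD bpms 0 0, (0 : Int))
  let in_range := tracks.filter (fun t => decide (0 < pvGetBpm t ∧ |pvGetBpm t - best.1| ≤ bpm_range))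
  let out_range := tracks.filter (fun t => !(in_range.contains t))
  PySem.List.sorted in_range pvGetBpm ++ out_range

-- ===== PORT B =====
-- the closure `window(c)`; _bisect_left/_bisect_right in Source B are CPython's bisect loops = the prelude's primitives
def pvWindow (s : List Int) (r c : Int) : Int :=
  (PySem.List.bisectRight s (c + r) : Int) - (PySem.List.bisectLeft s (c - r) : Int)

def order_by_bpm_py_alt (tracks : List (List (String × Int))) (bpm_range : Int) : List (List (String × Int)) :=
  if (tracks.length : Int) ≤ 2 then tracks else
  let bpms := (tracks.filter (fun t => decide (0 < pvGetBpm t))).map pvGetBpm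
  if bpms = [] then tracks else
  let s := PySem.List.sorted bpms (fun b => b)
  -- max(bpms, key=window): the FIRST maximal element; bpms ≠ [] here, so max? is some
  let best_center := (PySem.List.max? bpms (pvWindow s bpm_range)).getD 0
  -- sorted(tracks, key=key) with the tuple key (0, b) / (1, 0) → sorted2 with the two components
  PySem.List.sorted2 tracks
    (fun t => if 0 < pvGetBpm t ∧ |pvGetBpm t - best_center| ≤ bpm_range then (0 : Int) else 1)
    (fun t => if 0 < pvGetBpm t ∧ |pvGetBpm t - best_center| ≤ bpm_range then pvGetBpm t else 0)

-- ===== PRECONDITION & SPEC =====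
def Spec_order_by_bpm_py (tracks : List (List (String × Int))) (bpm_range : Int) (out : List (List (String × Int))) : Prop := out = order_by_bpm_py_alt tracks bpm_range
instance (tracks : List (List (String × Int))) (bpm_range : Int) (out : List (List (String × Int))) : Decidable (Spec_order_by_bpm_py tracks bpm_range out) := by unfold Spec_order_by_bpm_py; infer_instance

-- ===== CLAIM (what is proved, stated in full; the proofs are below) =====
def Claim_equal_order_by_bpm_py : Prop := ∀ (tracks : List (List (String × Int))) (bpm_range : Int), Dom_order_by_bpm_py tracks bpm_range → Spec_order_by_bpm_py tracks bpm_range (order_by_bpm_py tracks bpm_range)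

-- ===== LEMMAS AND PROOFS =====

-- bisect_left on a sorted list counts the elements < x
theorem pv_bisectLeft_eq_countP (s : List Int) (x : Int) (hs : s.Pairwise (· ≤ ·)) :
    PySem.List.bisectLeft s x = s.countP (fun b => decide (b < x)) := by
  obtain ⟨hk, hlt, hge⟩ := PySem.List.bisectLeft_spec s x hs
  set k := PySem.List.bisectLeft s x with hkdef
  have h1 : s.countP (fun b => decide (b < x)) =
      (s.take k).countP (fun b => decide (b < x)) + (s.drop k).countP (fun b => decide (b < x)) := by
    rw [← List.countP_append, List.take_append_drop]
  have h2 : (s.take k).countP (fun b => decide (b < x)) = (s.take k).length := by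
    rw [List.countP_eq_length]
    intro a ha
    obtain ⟨i, hi, rfl⟩ := List.mem_iff_getElem.mp ha
    have hik : i < k := by simp [List.length_take] at hi; omega
    have hil : i < s.length := lt_of_lt_of_le hik hk
    rw [List.getElem_take]
    exact decide_eq_true (hlt i hil hik)
  have h3 : (s.drop k).countP (fun b => decide (b < x)) = 0 := by
    rw [List.countP_eq_zero]
    intro a ha
    obtain ⟨i, hi, rfl⟩ := List.mem_iff_getElem.mp ha
    have hi' : k + i < s.length := by simp [List.length_drop] at hi; omega
    rw [List.getElem_drop]
    simp only [decide_eq_true_eq, not_lt]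
    exact hge (k + i) hi' (Nat.le_add_right _ _)
  rw [h1, h2, h3, List.length_take]
  omega

-- bisect_right on a sorted list counts the elements ≤ x
theorem pv_bisectRight_eq_countP (s : List Int) (x : Int) (hs : s.Pairwise (· ≤ ·)) :
    PySem.List.bisectRight s x = s.countP (fun b => decide (b ≤ x)) := by
  obtain ⟨hk, hle, hgt⟩ := PySem.List.bisectRight_spec s x hs
  set k := PySem.List.bisectRight s x with hkdef
  have h1 : s.countP (fun b => decide (b ≤ x)) =
      (s.take k).countP (fun b => decide (b ≤ x)) + (s.drop k).countP (fun b => decide (b ≤ x)) := by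
    rw [← List.countP_append, List.take_append_drop]
  have h2 : (s.take k).countP (fun b => decide (b ≤ x)) = (s.take k).length := by
    rw [List.countP_eq_length]
    intro a ha
    obtain ⟨i, hi, rfl⟩ := List.mem_iff_getElem.mp ha
    have hik : i < k := by simp [List.length_take] at hi; omega
    have hil : i < s.length := lt_of_lt_of_le hik hk
    rw [List.getElem_take]
    exact decide_eq_true (hle i hil hik)
  have h3 : (s.drop k).countP (fun b => decide (b ≤ x)) = 0 := by
    rw [List.countP_eq_zero]
    intro a ha
    obtain ⟨i, hi, rfl⟩ := List.mem_iff_getElem.mp ha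
    have hi' : k + i < s.length := by simp [List.length_drop] at hi; omega
    rw [List.getElem_drop]
    simp only [decide_eq_true_eq, not_le]
    exact hgt (k + i) hi' (Nat.le_add_right _ _)
  rw [h1, h2, h3, List.length_take]
  omega

-- the window-count identity on counts, for a genuine window lo ≤ hi
theorem pv_countP_window (l : List Int) (lo hi : Int) (h : lo ≤ hi) :
    (l.countP (fun b => decide (b ≤ hi)) : Int) - (l.countP (fun b => decide (b < lo)) : Int)
      = (l.countP (fun b => decide (lo ≤ b ∧ b ≤ hi)) : Int) := by
  induction l with
  | nil => simp
  | cons a l ih =>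
    simp only [List.countP_cons, decide_eq_true_eq]
    split_ifs <;> push_cast <;> omega

-- for 0 ≤ r, B's bisect window count equals A's |b - c| ≤ r count
theorem pv_window_eq (bpms : List Int) (r c : Int) (hr : 0 ≤ r) :
    (PySem.List.bisectRight (PySem.List.sorted bpms (fun b => b)) (c + r) : Int) -
    (PySem.List.bisectLeft (PySem.List.sorted bpms (fun b => b)) (c - r) : Int)
    = (bpms.countP (fun b => decide (|b - c| ≤ r)) : Int) := by
  have hpair : (PySem.List.sorted bpms (fun b => b)).Pairwise (· ≤ ·) :=
    PySem.List.sorted_pairwise bpms (fun b => b)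
  have hperm : (PySem.List.sorted bpms (fun b => b)).Perm bpms :=
    PySem.List.sorted_perm bpms (fun b => b) false
  rw [pv_bisectRight_eq_countP _ _ hpair, pv_bisectLeft_eq_countP _ _ hpair,
      hperm.countP_eq, hperm.countP_eq, pv_countP_window bpms (c - r) (c + r) (by omega)]
  congr 1
  apply List.countP_congr
  intro b _
  simp only [decide_eq_true_eq, abs_le]
  omega

-- A's sum-loop computes a countP
theorem pv_count_loop (bpms : List Int) (r c : Int) :
    bpms.foldl (fun acc b => if |b - c| ≤ r then acc + 1 else acc) (0 : Int)
      = (bpms.countP (fun b => decide (|b - c| ≤ r)) : Int) := by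
  have e : (fun (acc : Int) (b : Int) => if |b - c| ≤ r then acc + 1 else acc)
      = (fun acc b => if (fun b => decide (|b - c| ≤ r)) b = true then acc + 1 else acc) := by
    funext acc b; simp
  rw [e, PySem.List.foldl_count_if, zero_add]

-- A's first-strict-max scan (state carrying its own count) = Python max(…, key=cnt)
theorem pv_fold_max (cnt : Int → Int) (t : List Int) (m : Int) (d : Int) :
    (t.foldl (fun st c => if st.2 < cnt c then (c, cnt c) else st) (m, cnt m)).1
      = (t.foldl (fun acc x => match acc with
          | none => some x
          | some mm => if cnt mm < cnt x then some x else some mm) (some m)).getD d := by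
  induction t generalizing m with
  | nil => rfl
  | cons c t ih =>
    simp only [List.foldl_cons]
    by_cases h : cnt m < cnt c
    · rw [if_pos h, if_pos h]; exact ih c
    · rw [if_neg h, if_neg h]; exact ih m

-- insertBy appends at the end when `before` never fires
theorem pv_insertBy_last {α : Type} (before : α → α → Bool) (x : α) (l : List α)
    (h : ∀ y ∈ l, before x y = false) : PySem.List.insertBy before x l = l ++ [x] := by
  induction l with
  | nil => rfl
  | cons a l ih =>
    simp only [PySem.List.insertBy, h a List.mem_cons_self, Bool.false_eq_true, if_false]
    simp only [List.cons_append, List.cons.injEq, true_and]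
    exact ih (fun y hy => h y (List.mem_cons_of_mem a hy))

-- insertBy only looks at `before x ·` on the members of the list
theorem pv_insertBy_congr {α : Type} (bf bf' : α → α → Bool) (x : α) (l : List α)
    (h : ∀ y ∈ l, bf x y = bf' x y) : PySem.List.insertBy bf x l = PySem.List.insertBy bf' x l := by
  induction l with
  | nil => rfl
  | cons a l ih =>
    simp only [PySem.List.insertBy, h a List.mem_cons_self]
    split_ifs with hb
    · rfl
    · simp only [List.cons.injEq, true_and]
      exact ih (fun y hy => h y (List.mem_cons_of_mem a hy))

-- inserting an element that goes before the whole suffix O lands inside the prefix S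
theorem pv_insertBy_append {α : Type} (before : α → α → Bool) (x : α) (S O : List α)
    (hO : ∀ y ∈ O, before x y = true) :
    PySem.List.insertBy before x (S ++ O) = PySem.List.insertBy before x S ++ O := by
  induction S with
  | nil =>
    cases O with
    | nil => rfl
    | cons y ys => simp [PySem.List.insertBy, hO y List.mem_cons_self]
  | cons a S ih =>
    simp only [List.cons_append, PySem.List.insertBy]
    split_ifs with hb
    · rfl
    · simp [ih]

-- the two-block stability lemma: a stable sort under the tuple key (0, key t) / (1, 0)
-- is "sort the p-block by key, then the rest in original order"
theorem pv_two_block {α : Type} (p : α → Bool) (key : α → Int) (l S O : List α)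
    (hS : ∀ y ∈ S, p y = true) (hO : ∀ y ∈ O, p y = false) :
    l.foldl (fun acc x => PySem.List.insertBy
        (fun a b => decide ((if p a then (0:Int) else 1) < (if p b then (0:Int) else 1)) ||
          (!decide ((if p b then (0:Int) else 1) < (if p a then (0:Int) else 1)) &&
            decide ((if p a then key a else 0) < (if p b then key b else 0)))) x acc) (S ++ O)
      = (l.filter p).foldl (fun acc x => PySem.List.insertBy
          (fun a b => decide (key a < key b)) x acc) S ++ (O ++ l.filter (fun t => !p t)) := by
  induction l generalizing S O with
  | nil => simp
  | cons x l ih =>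
    simp only [List.foldl_cons, List.filter_cons]
    by_cases hx : p x = true
    · have hstep : PySem.List.insertBy
          (fun a b => decide ((if p a then (0:Int) else 1) < (if p b then (0:Int) else 1)) ||
            (!decide ((if p b then (0:Int) else 1) < (if p a then (0:Int) else 1)) &&
              decide ((if p a then key a else 0) < (if p b then key b else 0)))) x (S ++ O)
          = PySem.List.insertBy (fun a b => decide (key a < key b)) x S ++ O := by
        rw [pv_insertBy_append _ _ _ _ (by intro y hy; simp [hx, hO y hy])]
        congr 1
        exact pv_insertBy_congr _ _ _ _ (by intro y hy; simp [hx, hS y hy])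
      rw [hstep, hx, if_pos rfl]
      simp only [List.foldl_cons]
      exact ih _ _ (by
        intro y hy
        rcases (PySem.List.mem_insertBy _ _ _ _).mp hy with rfl | hy'
        · exact hx
        · exact hS y hy') hO
    · have hx' : p x = false := by simpa using hx
      have hstep : PySem.List.insertBy
          (fun a b => decide ((if p a then (0:Int) else 1) < (if p b then (0:Int) else 1)) ||
            (!decide ((if p b then (0:Int) else 1) < (if p a then (0:Int) else 1)) &&
              decide ((if p a then key a else 0) < (if p b then key b else 0)))) x (S ++ O)
          = S ++ (O ++ [x]) := by
        rw [← List.append_assoc]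
        apply pv_insertBy_last
        intro y hy
        rcases List.mem_append.mp hy with hy' | hy'
        · simp [hx', hS y hy']
        · simp [hx', hO y hy']
      rw [hstep, hx', if_neg (by simp)]
      rw [ih S (O ++ [x]) hS (by
        intro y hy
        rcases List.mem_append.mp hy with hy' | hy'
        · exact hO y hy'
        · simpa using List.mem_singleton.mp hy' ▸ hx')]
      simp

-- membership in a filtered sublist is just the filter test, for elements of the base list
theorem pv_contains_filter {α : Type} [BEq α] [LawfulBEq α] (l : List α) (q : α → Bool) (t : α)
    (ht : t ∈ l) : (l.filter q).contains t = q t := by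
  by_cases h : q t = true
  · simp [List.mem_filter, ht, h]
  · simp only [Bool.not_eq_true] at h
    simp [List.mem_filter, h]

-- for 0 ≤ r the two programs pick the same center
theorem pv_best_eq (bpms : List Int) (r : Int) (hr : 0 ≤ r) (h : Int) (tl : List Int)
    (hc : bpms = h :: tl) :
    (bpms.foldl (fun st center =>
        let count := bpms.foldl (fun acc b => if |b - center| ≤ r then acc + 1 else acc) (0 : Int)
        if st.2 < count then (center, count) else st) (PySem.List.pyGetD bpms 0 0, (0 : Int))).1
      = (PySem.List.max? bpms (pvWindow (PySem.List.sorted bpms (fun b => b)) r)).getD 0 := by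
  subst hc
  have hcnt : ∀ c, (h :: tl).foldl (fun acc b => if |b - c| ≤ r then acc + 1 else acc) (0 : Int)
      = pvWindow (PySem.List.sorted (h :: tl) (fun b => b)) r c := by
    intro c
    rw [pv_count_loop, pvWindow, pv_window_eq (h :: tl) r c hr]
  have hswap : (h :: tl).foldl (fun st center =>
        let count := (h :: tl).foldl (fun acc b => if |b - center| ≤ r then acc + 1 else acc) (0 : Int)
        if st.2 < count then (center, count) else st) (PySem.List.pyGetD (h :: tl) 0 0, (0 : Int))
      = (h :: tl).foldl (fun st c =>
          if st.2 < pvWindow (PySem.List.sorted (h :: tl) (fun b => b)) r c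
          then (c, pvWindow (PySem.List.sorted (h :: tl) (fun b => b)) r c) else st)
          (PySem.List.pyGetD (h :: tl) 0 0, (0 : Int)) := by
    apply PySem.List.foldl_congr_mem
    intro a x _
    simp only [hcnt]
  rw [hswap]
  have hinit : PySem.List.pyGetD (h :: tl) 0 0 = h := by
    simp [PySem.List.pyGetD, PySem.List.pyGet?, PySem.List.pyIdx?]
  rw [hinit]
  have hpos : ((h, (0 : Int)) : Int × Int).2 < pvWindow (PySem.List.sorted (h :: tl) (fun b => b)) r h := by
    show (0 : Int) < _
    rw [← hcnt h, pv_count_loop]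
    have : 0 < (h :: tl).countP (fun b => decide (|b - h| ≤ r)) :=
      List.countP_pos_iff.mpr ⟨h, List.mem_cons_self, by simp; omega⟩
    exact_mod_cast this
  simp only [List.foldl_cons, if_pos hpos]
  rw [pv_fold_max (pvWindow (PySem.List.sorted (h :: tl) (fun b => b)) r) tl h 0]
  rw [PySem.List.max?]
  simp only [List.foldl_cons]
  congr 1
  congr 1
  funext acc x
  cases acc with
  | none => rfl
  | some m => simp

-- assembling the result: A's sorted-block-plus-membership-fallback = B's single stable two-key sort,
-- provided the two in-range predicates agree pointwise
theorem pv_assemble (tracks : List (List (String × Int))) (r bA bB : Int)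
    (hpred : ∀ t, decide (0 < pvGetBpm t ∧ |pvGetBpm t - bA| ≤ r)
      = decide (0 < pvGetBpm t ∧ |pvGetBpm t - bB| ≤ r)) :
    PySem.List.sorted (tracks.filter (fun t => decide (0 < pvGetBpm t ∧ |pvGetBpm t - bA| ≤ r))) pvGetBpm
        ++ tracks.filter (fun t =>
            !((tracks.filter (fun t => decide (0 < pvGetBpm t ∧ |pvGetBpm t - bA| ≤ r))).contains t))
      = PySem.List.sorted2 tracks
          (fun t => if 0 < pvGetBpm t ∧ |pvGetBpm t - bB| ≤ r then (0 : Int) else 1)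
          (fun t => if 0 < pvGetBpm t ∧ |pvGetBpm t - bB| ≤ r then pvGetBpm t else 0) := by
  simp only [hpred]
  have hout : tracks.filter (fun t =>
        !((tracks.filter (fun t => decide (0 < pvGetBpm t ∧ |pvGetBpm t - bB| ≤ r))).contains t))
      = tracks.filter (fun t => !(decide (0 < pvGetBpm t ∧ |pvGetBpm t - bB| ≤ r))) := by
    apply List.filter_congr
    intro t ht
    rw [pv_contains_filter _ _ _ ht]
  rw [hout]
  have h2b := pv_two_block (fun t => decide (0 < pvGetBpm t ∧ |pvGetBpm t - bB| ≤ r))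
    pvGetBpm tracks [] [] (by simp) (by simp)
  simp only [List.nil_append, decide_eq_true_eq] at h2b
  rw [PySem.List.sorted_eq_foldl_insertBy, ← h2b]
  rfl

-- ===== VERDICT (by name: the statement is the Claim_ definition above) =====
theorem order_by_bpm_py_spec : Claim_equal_order_by_bpm_py := by
  intro tracks bpm_range _
  unfold Spec_order_by_bpm_py order_by_bpm_py order_by_bpm_py_alt
  by_cases h2 : (tracks.length : Int) ≤ 2
  · simp only [if_pos h2]
  · simp only [if_neg h2]
    by_cases hb : (tracks.filter (fun t => decide (0 < pvGetBpm t))).map pvGetBpm = []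
    · simp only [if_pos hb]
    · simp only [if_neg hb]
      obtain ⟨hh, tl, hc⟩ := List.exists_cons_of_ne_nil hb
      by_cases hr : 0 ≤ bpm_range
      · have hbest := pv_best_eq ((tracks.filter (fun t => decide (0 < pvGetBpm t))).map pvGetBpm)
          bpm_range hr hh tl hc
        exact pv_assemble tracks bpm_range _ _ (fun t => by rw [hbest])
      · have hfalse : ∀ (b : Int) t, decide (0 < pvGetBpm t ∧ |pvGetBpm t - b| ≤ bpm_range) = false := by
          intro b t
          simp only [decide_eq_false_iff_not]
          rintro ⟨-, habs⟩
          have := abs_nonneg (pvGetBpm t - b)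
          omega
        exact pv_assemble tracks bpm_range _ _ (fun t => by rw [hfalse, hfalse])
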